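-- pv_equiv track=rewrite | github.com/tollefj/UD-NARC | alignment/NARC/ann_to_json.py | get_continuous_spans
-- ===== SOURCE A (Python) =====
-- def get_continuous_spans(refs):
--     spans = []
--     start = int(refs[0])
--     for ref in refs[1:]:
--         if ";" in ref:
--             discont = ref.split(";")
--             end = int(discont[0])
--             spans.append([start, end])
--             # do not include part of the discontinuity
--             start = int(discont[1]) + 1
--         else:
--             end = int(ref)
--             spans.append([start, end])
--             start = end
--
--     return spans
-- ===== SOURCE B (Python) =====
-- def get_continuous_spans(refs):
--     ends = []
--     next_starts = []
--     for ref in refs[1:]: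
--         if ";" in ref:
--             parts = ref.split(";")
--             ends.append(int(parts[0]))
--             next_starts.append(int(parts[1]) + 1)
--         else:
--             v = int(ref)
--             ends.append(v)
--             next_starts.append(v)
--     starts = [int(refs[0])] + next_starts[:-1]
--     return [[s, e] for s, e in zip(starts, ends)]
-- ===== Notes on version B (the rewrite author's own statement) =====
-- stated objective: alternative
-- what changed: A threads a running 'start' accumulator through one stateful loop; B extracts two parallel boundary lists (ends and next-starts) in a first pass and then pairs a shifted starts list with ends via zip.
import Mathlib
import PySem

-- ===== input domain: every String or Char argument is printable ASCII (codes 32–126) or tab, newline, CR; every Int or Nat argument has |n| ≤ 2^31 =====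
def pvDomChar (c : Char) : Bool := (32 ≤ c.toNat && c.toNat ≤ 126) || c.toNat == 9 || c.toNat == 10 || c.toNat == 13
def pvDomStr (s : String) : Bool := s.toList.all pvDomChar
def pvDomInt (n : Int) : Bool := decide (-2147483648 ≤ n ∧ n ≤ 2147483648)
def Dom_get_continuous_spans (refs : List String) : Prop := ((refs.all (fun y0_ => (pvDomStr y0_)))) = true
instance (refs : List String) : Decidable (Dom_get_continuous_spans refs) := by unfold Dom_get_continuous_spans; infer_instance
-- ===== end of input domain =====

-- B replaces A's stateful start-accumulator loop by boundary extraction into two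
-- parallel lists (ends / next-starts) followed by a shift-and-zip pairing; same cost.


-- ===== PORT A =====
def get_continuous_spans (refs : List String) : List (List Int) :=
  let start : Int := (PySem.Int.ofStr? ((PySem.List.pyGet? refs 0).getD "")).getD 0
  ((PySem.List.slice refs (some 1) none).foldl
    (fun (st : List (List Int) × Int) ref =>
      if PySem.Str.isIn ";" ref then
        let discont := ((PySem.Str.split? ref ";").getD [])
        let e : Int := (PySem.Int.ofStr? ((PySem.List.pyGet? discont 0).getD "")).getD 0
        (st.1 ++ [[st.2, e]], (PySem.Int.ofStr? ((PySem.List.pyGet? discont 1).getD "")).getD 0 + 1)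
      else
        let e : Int := (PySem.Int.ofStr? ref).getD 0
        (st.1 ++ [[st.2, e]], e))
    ([], start)).1

-- ===== PORT B =====
def get_continuous_spans_alt (refs : List String) : List (List Int) :=
  let st := (PySem.List.slice refs (some 1) none).foldl
    (fun (st : List Int × List Int) ref =>
      if PySem.Str.isIn ";" ref then
        let parts := ((PySem.Str.split? ref ";").getD [])
        (st.1 ++ [(PySem.Int.ofStr? ((PySem.List.pyGet? parts 0).getD "")).getD 0],
         st.2 ++ [(PySem.Int.ofStr? ((PySem.List.pyGet? parts 1).getD "")).getD 0 + 1])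
      else
        let v : Int := (PySem.Int.ofStr? ref).getD 0
        (st.1 ++ [v], st.2 ++ [v]))
    ([], [])
  let starts : List Int :=
    (PySem.Int.ofStr? ((PySem.List.pyGet? refs 0).getD "")).getD 0 ::
      PySem.List.slice st.2 none (some (-1))
  (starts.zip st.1).map (fun p => [p.1, p.2])

-- ===== PRECONDITION & SPEC =====
-- Pre_ excludes exactly the inputs where Python A raises: empty refs (IndexError) and
-- elements int() cannot parse (ValueError), including a ';' piece that fails to parse.
def Pre_get_continuous_spans (refs : List String) : Prop :=
  refs ≠ [] ∧
  (PySem.Int.ofStr? ((PySem.List.pyGet? refs 0).getD "")).isSome = true ∧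
  ∀ r ∈ refs.tail,
    if PySem.Str.isIn ";" r = true then
      (PySem.Int.ofStr? ((PySem.List.pyGet? (((PySem.Str.split? r ";").getD [])) 0).getD "")).isSome = true ∧
      (PySem.Int.ofStr? ((PySem.List.pyGet? (((PySem.Str.split? r ";").getD [])) 1).getD "")).isSome = true
    else (PySem.Int.ofStr? r).isSome = true
instance (refs : List String) : Decidable (Pre_get_continuous_spans refs) := by
  unfold Pre_get_continuous_spans; infer_instance

def pvWitness_get_continuous_spans : List String := ["1", "3", "5;7", "9"]

def Spec_get_continuous_spans (refs : List String) (out : List (List Int)) : Prop := out = get_continuous_spans_alt refs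
instance (refs : List String) (out : List (List Int)) : Decidable (Spec_get_continuous_spans refs out) := by unfold Spec_get_continuous_spans; infer_instance

-- ===== CLAIM (what is proved, stated in full; the proofs are below) =====
def Claim_equal_get_continuous_spans : Prop := ∀ (refs : List String), Dom_get_continuous_spans refs → Pre_get_continuous_spans refs → Spec_get_continuous_spans refs (get_continuous_spans refs)

-- ===== LEMMAS AND PROOFS =====

-- per-element boundary values (proof-side abbreviations only)
def pvEnd (ref : String) : Int :=
  if PySem.Str.isIn ";" ref then
    (PySem.Int.ofStr? ((PySem.List.pyGet? (((PySem.Str.split? ref ";").getD [])) 0).getD "")).getD 0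
  else (PySem.Int.ofStr? ref).getD 0

def pvNext (ref : String) : Int :=
  if PySem.Str.isIn ";" ref then
    (PySem.Int.ofStr? ((PySem.List.pyGet? (((PySem.Str.split? ref ";").getD [])) 1).getD "")).getD 0 + 1
  else (PySem.Int.ofStr? ref).getD 0

theorem pvSliceNegOne (xs : List Int) :
    PySem.List.slice xs none (some (-1)) = xs.dropLast := by
  cases xs with
  | nil => rfl
  | cons x l =>
      simp [PySem.List.slice, PySem.List.clampIdx, List.dropLast_eq_take]
      split_ifs <;> omega

theorem pvBfold (l : List String) (as bs : List Int) :
    (l.foldl (fun (st : List Int × List Int) ref =>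
        (st.1 ++ [pvEnd ref], st.2 ++ [pvNext ref])) (as, bs))
      = (as ++ l.map pvEnd, bs ++ l.map pvNext) := by
  induction l generalizing as bs with
  | nil => simp
  | cons r l ih => simp [ih]

theorem pvAfold (l : List String) (spans : List (List Int)) (start : Int) :
    (l.foldl (fun (st : List (List Int) × Int) ref =>
        (st.1 ++ [[st.2, pvEnd ref]], pvNext ref)) (spans, start)).1
      = spans ++ ((start :: (l.map pvNext).dropLast).zip (l.map pvEnd)).map
          (fun p => [p.1, p.2]) := by
  induction l generalizing spans start with
  | nil => simp
  | cons r l ih =>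
      simp only [List.foldl_cons, ih, List.map_cons, List.append_assoc]
      congr 1
      cases l with
      | nil => simp
      | cons r2 l2 => simp

theorem pvAbody :
    (fun (st : List (List Int) × Int) ref =>
      if PySem.Str.isIn ";" ref then
        let discont := ((PySem.Str.split? ref ";").getD [])
        let e : Int := (PySem.Int.ofStr? ((PySem.List.pyGet? discont 0).getD "")).getD 0
        (st.1 ++ [[st.2, e]], (PySem.Int.ofStr? ((PySem.List.pyGet? discont 1).getD "")).getD 0 + 1)
      else
        let e : Int := (PySem.Int.ofStr? ref).getD 0
        (st.1 ++ [[st.2, e]], e))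
    = (fun (st : List (List Int) × Int) ref =>
        (st.1 ++ [[st.2, pvEnd ref]], pvNext ref)) := by
  funext st ref
  simp only [pvEnd, pvNext]
  split <;> rfl

theorem pvBbody :
    (fun (st : List Int × List Int) ref =>
      if PySem.Str.isIn ";" ref then
        let parts := ((PySem.Str.split? ref ";").getD [])
        (st.1 ++ [(PySem.Int.ofStr? ((PySem.List.pyGet? parts 0).getD "")).getD 0],
         st.2 ++ [(PySem.Int.ofStr? ((PySem.List.pyGet? parts 1).getD "")).getD 0 + 1])
      else
        let v : Int := (PySem.Int.ofStr? ref).getD 0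
        (st.1 ++ [v], st.2 ++ [v]))
    = (fun (st : List Int × List Int) ref =>
        (st.1 ++ [pvEnd ref], st.2 ++ [pvNext ref])) := by
  funext st ref
  simp only [pvEnd, pvNext]
  split <;> rfl

-- ===== VERDICT (by name: the statement is the Claim_ definition above) =====
theorem get_continuous_spans_spec : Claim_equal_get_continuous_spans := by
  intro refs _ _
  show get_continuous_spans refs = get_continuous_spans_alt refs
  unfold get_continuous_spans get_continuous_spans_alt
  rw [pvAbody, pvBbody]
  rw [PySem.List.slice_from refs (a := 1) (by norm_num)]
  rw [pvBfold, pvAfold]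
  simp [pvSliceNegOne]
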